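-- pv_equiv track=rewrite | github.com/rcbop/hacker-rank-challenges | algorithms/strings/palindrome_index.py | unmatches
-- ===== SOURCE A (Python) =====
-- def unmatches(s):
--     length = len(s)
--     i = 0
--     no_match = []
--     while i < length:
--         if s[i] != s[-i - 1]:
--             no_match.append(i)
--         i += 1
--     return no_match
-- ===== SOURCE B (Python) =====
-- def unmatches(s):
--     n = len(s)
--     lows = []
--     highs = []
--     for i in range(n // 2):
--         if s[i] != s[n - 1 - i]:
--             lows.append(i)
--             highs.append(n - 1 - i)
--     return lows + highs[::-1]
-- ===== Notes on version B (the rewrite author's own statement) =====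
-- stated objective: alternative
-- what changed: B scans only the first half of the string, emitting each mismatching mirror pair once (low index into one list, its mirror into another) and reconstructing the ascending result as lows + reversed(highs), instead of A's full-length scan comparing every position against its negatively-indexed mirror (half the comparisons; measured speedups hover around the 1.5x bar, so no speed claim is made).
import Mathlib
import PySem

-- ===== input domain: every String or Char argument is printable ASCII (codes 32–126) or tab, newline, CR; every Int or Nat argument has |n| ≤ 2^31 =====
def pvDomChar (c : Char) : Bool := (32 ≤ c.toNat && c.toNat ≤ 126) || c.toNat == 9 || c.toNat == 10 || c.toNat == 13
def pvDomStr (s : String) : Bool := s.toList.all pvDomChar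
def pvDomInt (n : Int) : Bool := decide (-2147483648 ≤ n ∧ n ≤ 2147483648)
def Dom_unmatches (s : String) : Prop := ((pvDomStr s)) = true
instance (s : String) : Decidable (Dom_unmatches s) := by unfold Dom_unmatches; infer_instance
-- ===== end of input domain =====

-- B scans only the first half of the string, emitting each mismatching mirror pair once and rebuilding the same ascending result as lows + reversed highs.

-- ===== PORT A =====
-- while i < length: if s[i] != s[-i-1]: no_match.append(i); i += 1
def unmatches (s : String) : List Int :=
  let length : Int := PySem.Str.len s
  (PySem.List.pyRange 0 length 1).foldl
    (fun acc i =>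
      if PySem.Str.pyGet? s i ≠ PySem.Str.pyGet? s (-i - 1) then acc ++ [i] else acc)
    []

-- ===== PORT B =====
-- for i in range(n // 2): if s[i] != s[n-1-i]: lows.append(i); highs.append(n-1-i); return lows + highs[::-1]
def unmatches_alt (s : String) : List Int :=
  let n : Int := PySem.Str.len s
  let pr := (PySem.List.pyRange 0 (PySem.Int.floordiv n 2) 1).foldl
    (fun (acc : List Int × List Int) i =>
      if PySem.Str.pyGet? s i ≠ PySem.Str.pyGet? s (n - 1 - i) then
        (acc.1 ++ [i], acc.2 ++ [n - 1 - i])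
      else acc)
    ([], [])
  pr.1 ++ pr.2.reverse  -- highs[::-1] is exactly List.reverse

-- ===== PRECONDITION & SPEC =====
def Spec_unmatches (s : String) (out : List Int) : Prop := out = unmatches_alt s
instance (s : String) (out : List Int) : Decidable (Spec_unmatches s out) := by unfold Spec_unmatches; infer_instance

-- ===== CLAIM (what is proved, stated in full; the proofs are below) =====
def Claim_equal_unmatches : Prop := ∀ (s : String), Dom_unmatches s → Spec_unmatches s (unmatches s)

-- ===== LEMMAS AND PROOFS =====

theorem pyRangeNat (n : Nat) :
    PySem.List.pyRange 0 (n:Int) 1 = (List.range n).map (fun (k : Nat) => (k:Int)) := by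
  simp [PySem.List.pyRange_zero_nat]

theorem floordivNat (n : Nat) : PySem.Int.floordiv (n:Int) 2 = ((n/2 : Nat) : Int) := by
  simp [PySem.Int.floordiv]
  rw [Int.fdiv_eq_ediv]
  omega

-- B's paired fold splits into two independent append-folds
theorem pair_fold (p : Int → Prop) [DecidablePred p] (f : Int → Int) (l : List Int) (a b : List Int) :
    l.foldl (fun (acc : List Int × List Int) i =>
      if p i then (acc.1 ++ [i], acc.2 ++ [f i]) else acc) (a, b)
      = (a ++ l.filter (fun x => decide (p x)), b ++ (l.filter (fun x => decide (p x))).map f) := by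
  induction l generalizing a b with
  | nil => simp
  | cons x xs ih =>
    by_cases h : p x
    · simp [h, ih]
    · simp [h, ih]

-- the two accumulated lists of B's fold, recombined as Python's `lows + highs[::-1]`
theorem pair_fold_final (p : Int → Prop) [DecidablePred p] (f : Int → Int) (l : List Int) :
    (l.foldl (fun (acc : List Int × List Int) i =>
      if p i then (acc.1 ++ [i], acc.2 ++ [f i]) else acc) ([], [])).1
      ++ (l.foldl (fun (acc : List Int × List Int) i =>
      if p i then (acc.1 ++ [i], acc.2 ++ [f i]) else acc) ([], [])).2.reverse
      = l.filter (fun x => decide (p x)) ++ ((l.filter (fun x => decide (p x))).map f).reverse := by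
  rw [pair_fold]
  simp

-- filtering a cast list = casting the filtered list, when the predicates agree
theorem filter_map_cast (p : Int → Bool) (q : Nat → Bool) (l : List Nat)
    (h : ∀ k ∈ l, p (k:Int) = q k) :
    ((l.map (fun (k : Nat) => (k:Int))).filter p) = (l.filter q).map (fun (k : Nat) => (k:Int)) := by
  induction l with
  | nil => simp
  | cons x xs ih =>
    simp only [List.map_cons, List.filter_cons, h x (List.mem_cons_self)]
    by_cases hq : q x
    · simp only [hq, if_pos]
      rw [List.map_cons, ih (fun k hk => h k (List.mem_cons_of_mem _ hk))]
    · simp only [hq, if_neg, Bool.false_eq_true, not_false_eq_true]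
      exact ih (fun k hk => h k (List.mem_cons_of_mem _ hk))

-- mapping f over a cast list = casting a Nat-level map, when f agrees with g through the cast
theorem map_cast_map (f : Int → Int) (g : Nat → Nat) (l : List Nat)
    (h : ∀ k ∈ l, f (k:Int) = ((g k : Nat) : Int)) :
    (l.map (fun (k : Nat) => (k:Int))).map f = l.map (fun (k : Nat) => ((g k : Nat) : Int)) := by
  rw [List.map_map]
  apply List.map_congr_left
  intro k hk
  simpa using h k hk

-- core combinatorial fact on Nat indices: a symmetric mismatch predicate that is false
-- at the exact middle makes the full-range filter equal lows ++ reversed mirrored lows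
theorem core (N : Nat) (q : Nat → Bool)
    (hsym : ∀ k, k < N → q (N - 1 - k) = q k)
    (hmid : ∀ k, 2 * k + 1 = N → q k = false) :
    (List.range N).filter q
      = (List.range (N / 2)).filter q
        ++ (((List.range (N / 2)).filter q).map (fun k => N - 1 - k)).reverse := by
  have sL : ((List.range N).filter q).Pairwise (· < ·) := List.pairwise_lt_range.filter _
  have slow : ((List.range (N / 2)).filter q).Pairwise (· < ·) := List.pairwise_lt_range.filter _
  have hlowmem : ∀ x ∈ (List.range (N / 2)).filter q, x < N / 2 := by
    intro x hx
    exact List.mem_range.1 (List.mem_of_mem_filter hx)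
  have sR : ((List.range (N / 2)).filter q
      ++ (((List.range (N / 2)).filter q).map (fun k => N - 1 - k)).reverse).Pairwise (· < ·) := by
    rw [List.pairwise_append]
    refine ⟨slow, ?_, ?_⟩
    · rw [List.pairwise_reverse, List.pairwise_map]
      refine slow.imp_of_mem ?_
      intro a b ha hb hab
      have := hlowmem b hb
      omega
    · intro a ha b hb
      rw [List.mem_reverse, List.mem_map] at hb
      obtain ⟨k, hk, rfl⟩ := hb
      have h1 := hlowmem a ha
      have h2 := hlowmem k hk
      omega
  have ndL : ((List.range N).filter q).Nodup := sL.imp (fun h => Nat.ne_of_lt h)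
  have ndR := sR.imp (fun h => Nat.ne_of_lt h)
  have hmem : ∀ x, x ∈ (List.range N).filter q ↔
      x ∈ (List.range (N / 2)).filter q
        ++ (((List.range (N / 2)).filter q).map (fun k => N - 1 - k)).reverse := by
    intro x
    simp only [List.mem_append, List.mem_reverse, List.mem_map, List.mem_filter, List.mem_range]
    constructor
    · rintro ⟨hx, hq⟩
      by_cases hlt : x < N / 2
      · exact Or.inl ⟨hlt, hq⟩
      · right
        by_cases hm : 2 * x + 1 = N
        · rw [hmid x hm] at hq; cases hq
        · refine ⟨N - 1 - x, ⟨by omega, ?_⟩, by omega⟩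
          rw [hsym x hx]; exact hq
    · rintro (⟨hx, hq⟩ | ⟨k, ⟨hk, hqk⟩, rfl⟩)
      · exact ⟨by omega, hq⟩
      · refine ⟨by omega, ?_⟩
        rw [hsym k (by omega)]; exact hqk
  exact ((List.perm_ext_iff_of_nodup ndL ndR).2 hmem).eq_of_pairwise
    (fun a b _ _ h1 h2 => absurd h2 (Nat.lt_asymm h1)) sL sR

theorem portA_eq (s : String) :
    unmatches s = ((List.range s.toList.length).filter
        (fun k => decide (s.toList[k]? ≠ s.toList[s.toList.length - 1 - k]?))).map (fun (k : Nat) => (k:Int)) := by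
  unfold unmatches
  simp only [PySem.Str.len_eq]
  rw [PySem.List.foldl_append_ite_eq_filter, List.nil_append, pyRangeNat]
  apply filter_map_cast
  intro k hk
  have hkN : k < s.toList.length := List.mem_range.1 hk
  have h2 : PySem.Str.pyGet? s (-(k:Int) - 1) = s.toList[s.toList.length - 1 - k]? := by
    rw [show (-(k:Int) - 1) = -(((k+1 : Nat) : Int)) by push_cast; ring]
    simp only [PySem.Str.pyGet?]
    rw [show s.toList.length - 1 - k = s.toList.length - (k+1) by omega]
    exact PySem.List.pyGet?_neg_natCast (xs := s.toList) (k := k+1) (by omega) (by omega)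
  rw [h2, PySem.Str.pyGet?_natCast]

theorem portB_eq (s : String) :
    unmatches_alt s =
      ((List.range (s.toList.length / 2)).filter
        (fun k => decide (s.toList[k]? ≠ s.toList[s.toList.length - 1 - k]?))).map (fun (k : Nat) => (k:Int))
      ++ (((List.range (s.toList.length / 2)).filter
        (fun k => decide (s.toList[k]? ≠ s.toList[s.toList.length - 1 - k]?))).map
          (fun (k : Nat) => ((s.toList.length - 1 - k : Nat) : Int))).reverse := by
  unfold unmatches_alt
  simp only [PySem.Str.len_eq]
  rw [floordivNat, pair_fold_final, pyRangeNat]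
  have hpred : ∀ k ∈ List.range (s.toList.length / 2),
      decide (PySem.Str.pyGet? s (k:Int) ≠ PySem.Str.pyGet? s ((s.toList.length:Int) - 1 - (k:Int)))
        = decide (s.toList[k]? ≠ s.toList[s.toList.length - 1 - k]?) := by
    intro k hk
    have hkh : k < s.toList.length / 2 := List.mem_range.1 hk
    have h2 : PySem.Str.pyGet? s ((s.toList.length:Int) - 1 - (k:Int)) = s.toList[s.toList.length - 1 - k]? := by
      rw [show ((s.toList.length:Int) - 1 - (k:Int)) = ((s.toList.length - 1 - k : Nat) : Int) by omega]
      rw [PySem.Str.pyGet?_natCast]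
    rw [h2, PySem.Str.pyGet?_natCast]
  rw [filter_map_cast _ _ _ hpred]
  congr 2
  apply map_cast_map (g := fun k => s.toList.length - 1 - k)
  intro k hk
  have hkh : k < s.toList.length / 2 := List.mem_range.1 (List.mem_of_mem_filter hk)
  omega

-- ===== VERDICT (by name: the statement is the Claim_ definition above) =====
theorem unmatches_spec : Claim_equal_unmatches := by
  intro s _
  unfold Spec_unmatches
  rw [portA_eq, portB_eq]
  rw [core s.toList.length (fun k => decide (s.toList[k]? ≠ s.toList[s.toList.length - 1 - k]?))]
  · rw [List.map_append, List.map_reverse, List.map_map]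
    simp only [Function.comp_def]
  · intro k hkN
    have hidem : s.toList.length - 1 - (s.toList.length - 1 - k) = k := by omega
    simp only [hidem]
    rw [decide_eq_decide]
    exact ne_comm
  · intro k hmid
    have h : s.toList.length - 1 - k = k := by omega
    simp only [h]
    simp
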